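-- pv_equiv track=rewrite | github.com/CarrollNew/Matryoshka | transposase_or_not.py | count_genes_between
-- ===== SOURCE A (Python) =====
-- def count_genes_between(repeat_coord1, repeat_coord2, genes_coords):
--     count = 0
--     count_of_transposase = 0
--     genes_ids = []
--     for (id, coord1, coord2, is_transposase) in genes_coords:
--         if (coord1 > repeat_coord1) and (coord2 < repeat_coord2):
--             count += 1
--             if is_transposase:
--                 count_of_transposase += 1
--             else:
--                 genes_ids.append(id)
--     return count, count_of_transposase, genes_ids
-- ===== SOURCE B (Python) =====
-- def count_genes_between(repeat_coord1, repeat_coord2, genes_coords):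
--     genes = list(genes_coords)
--
--     def solve(lo, hi):
--         # divide and conquer: combine half-results monoidally
--         if hi - lo == 0:
--             return 0, 0, []
--         if hi - lo == 1:
--             gid, coord1, coord2, is_transposase = genes[lo]
--             if coord1 > repeat_coord1 and coord2 < repeat_coord2:
--                 if is_transposase:
--                     return 1, 1, []
--                 return 1, 0, [gid]
--             return 0, 0, []
--         mid = (lo + hi) // 2
--         c1, t1, ids1 = solve(lo, mid)
--         c2, t2, ids2 = solve(mid, hi)
--         return c1 + c2, t1 + t2, ids1 + ids2
--
--     return solve(0, len(genes))
-- ===== Notes on version B (the rewrite author's own statement) =====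
-- stated objective: alternative
-- what changed: Replaces A's single linear loop with three mutable accumulators by a divide-and-conquer recursion that splits the gene list in half, solves each half independently, and combines the (count, transposase-count, ids) triples monoidally; correct because the triple combine is associative and preserves encounter order.
import Mathlib
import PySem

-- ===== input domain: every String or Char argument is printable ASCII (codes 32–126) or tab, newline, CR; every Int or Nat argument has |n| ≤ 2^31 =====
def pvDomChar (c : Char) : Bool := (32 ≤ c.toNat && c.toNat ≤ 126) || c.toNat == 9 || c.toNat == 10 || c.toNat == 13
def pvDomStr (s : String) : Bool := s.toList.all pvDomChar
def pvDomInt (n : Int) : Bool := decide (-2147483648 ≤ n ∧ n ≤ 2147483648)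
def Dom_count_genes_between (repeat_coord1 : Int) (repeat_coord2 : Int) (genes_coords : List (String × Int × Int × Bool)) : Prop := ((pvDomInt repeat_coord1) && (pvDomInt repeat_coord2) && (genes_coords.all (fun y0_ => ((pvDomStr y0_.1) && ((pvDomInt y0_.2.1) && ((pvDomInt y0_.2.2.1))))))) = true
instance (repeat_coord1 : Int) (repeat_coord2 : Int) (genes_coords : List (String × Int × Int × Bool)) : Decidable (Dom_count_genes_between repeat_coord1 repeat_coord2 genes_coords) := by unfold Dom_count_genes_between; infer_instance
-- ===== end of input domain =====

-- B replaces A's single linear loop with a divide-and-conquer recursion (split in half,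
-- solve halves, combine the triples monoidally); objective: alternative.

-- ===== PORT A =====
-- one loop, one state triple (count, count_of_transposase, genes_ids)
def count_genes_between (repeat_coord1 : Int) (repeat_coord2 : Int) (genes_coords : List (String × Int × Int × Bool)) : Int × Int × List String :=
  genes_coords.foldl
    (fun acc g =>
      let (count, count_of_transposase, genes_ids) := acc
      if g.2.1 > repeat_coord1 ∧ g.2.2.1 < repeat_coord2 then
        if g.2.2.2 then (count + 1, count_of_transposase + 1, genes_ids)
        else (count + 1, count_of_transposase, genes_ids ++ [g.1])
      else acc)
    (0, 0, [])

-- ===== PORT B =====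
-- Source B's `solve(lo, hi)` works on the slice genes[lo:hi]; the port recurses on that slice
-- directly, splitting it at its midpoint (take/drop at length/2), exactly Source B's mid = (lo+hi)//2.
-- The fuel argument (initially the list length) is only a structural-termination device:
-- every call keeps slice-length ≤ fuel, so the fuel-exhausted branch is unreachable.
def cgbSolve (repeat_coord1 : Int) (repeat_coord2 : Int) : Nat → List (String × Int × Int × Bool) → Int × Int × List String
  | _, [] => (0, 0, [])
  | _, [g] =>
      if g.2.1 > repeat_coord1 ∧ g.2.2.1 < repeat_coord2 then
        if g.2.2.2 then (1, 1, []) else (1, 0, [g.1])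
      else (0, 0, [])
  | 0, _ :: _ :: _ => (0, 0, [])   -- fuel exhausted: unreachable since slice-length ≤ fuel
  | fuel + 1, g1 :: g2 :: rest =>
      let l := g1 :: g2 :: rest
      let m := l.length / 2
      let a := cgbSolve repeat_coord1 repeat_coord2 fuel (l.take m)
      let b := cgbSolve repeat_coord1 repeat_coord2 fuel (l.drop m)
      (a.1 + b.1, a.2.1 + b.2.1, a.2.2 ++ b.2.2)

def count_genes_between_alt (repeat_coord1 : Int) (repeat_coord2 : Int) (genes_coords : List (String × Int × Int × Bool)) : Int × Int × List String :=
  cgbSolve repeat_coord1 repeat_coord2 genes_coords.length genes_coords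

-- ===== PRECONDITION & SPEC =====
def Spec_count_genes_between (repeat_coord1 : Int) (repeat_coord2 : Int) (genes_coords : List (String × Int × Int × Bool)) (out : Int × Int × List String) : Prop := out = count_genes_between_alt repeat_coord1 repeat_coord2 genes_coords
instance (repeat_coord1 : Int) (repeat_coord2 : Int) (genes_coords : List (String × Int × Int × Bool)) (out : Int × Int × List String) : Decidable (Spec_count_genes_between repeat_coord1 repeat_coord2 genes_coords out) := by unfold Spec_count_genes_between; infer_instance

-- ===== CLAIM (what is proved, stated in full; the proofs are below) =====
def Claim_equal_count_genes_between : Prop := ∀ (repeat_coord1 : Int) (repeat_coord2 : Int) (genes_coords : List (String × Int × Int × Bool)), Dom_count_genes_between repeat_coord1 repeat_coord2 genes_coords → Spec_count_genes_between repeat_coord1 repeat_coord2 genes_coords (count_genes_between repeat_coord1 repeat_coord2 genes_coords)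

-- ===== LEMMAS AND PROOFS =====
-- the common normal form both ports are reduced to
def cgbSpec (r1 r2 : Int) (l : List (String × Int × Int × Bool)) : Int × Int × List String :=
  let inside := l.filter (fun g => decide (g.2.1 > r1 ∧ g.2.2.1 < r2))
  ((inside.length : Int),
   ((inside.filter (fun g => g.2.2.2)).length : Int),
   (inside.filter (fun g => !g.2.2.2)).map (fun g => g.1))

theorem cgbSpec_append (r1 r2 : Int) (a b : List (String × Int × Int × Bool)) :
    cgbSpec r1 r2 (a ++ b) =
      ((cgbSpec r1 r2 a).1 + (cgbSpec r1 r2 b).1,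
       (cgbSpec r1 r2 a).2.1 + (cgbSpec r1 r2 b).2.1,
       (cgbSpec r1 r2 a).2.2 ++ (cgbSpec r1 r2 b).2.2) := by
  simp [cgbSpec]

theorem cgbSolve_eq_spec (r1 r2 : Int) : ∀ (fuel : Nat) (l : List (String × Int × Int × Bool)),
    l.length ≤ fuel → cgbSolve r1 r2 fuel l = cgbSpec r1 r2 l := by
  intro fuel
  induction fuel with
  | zero =>
      intro l h
      have hl : l = [] := by cases l <;> simp_all
      subst hl
      simp [cgbSolve, cgbSpec]
  | succ k ih =>
      intro l h
      cases l with
      | nil => simp [cgbSolve, cgbSpec]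
      | cons g1 t =>
        cases t with
        | nil =>
            by_cases hc : g1.2.1 > r1 ∧ g1.2.2.1 < r2
            · by_cases ht : g1.2.2.2 = true <;> simp [cgbSolve, cgbSpec, hc, ht]
            · simp [cgbSolve, cgbSpec, hc]
        | cons g2 rest =>
            have h1 : ((g1 :: g2 :: rest).take ((g1 :: g2 :: rest).length / 2)).length ≤ k := by
              simp at h ⊢; omega
            have h2 : ((g1 :: g2 :: rest).drop ((g1 :: g2 :: rest).length / 2)).length ≤ k := by
              simp at h ⊢; omega
            simp only [cgbSolve]
            rw [ih _ h1, ih _ h2, ← cgbSpec_append, List.take_append_drop]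

theorem cgb_fold_inv (r1 r2 : Int) (l : List (String × Int × Int × Bool))
    (c t : Int) (ids : List String) :
    l.foldl
      (fun acc g =>
        let (count, count_of_transposase, genes_ids) := acc
        if g.2.1 > r1 ∧ g.2.2.1 < r2 then
          if g.2.2.2 then (count + 1, count_of_transposase + 1, genes_ids)
          else (count + 1, count_of_transposase, genes_ids ++ [g.1])
        else acc)
      (c, t, ids)
    = (c + (cgbSpec r1 r2 l).1, t + (cgbSpec r1 r2 l).2.1, ids ++ (cgbSpec r1 r2 l).2.2) := by
  induction l generalizing c t ids with
  | nil => simp [cgbSpec]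
  | cons g l ih =>
    simp only [List.foldl_cons]
    by_cases h : g.2.1 > r1 ∧ g.2.2.1 < r2
    · by_cases ht : g.2.2.2 = true
      · simp [h, ht, ih, cgbSpec, add_assoc, add_comm]
      · simp [h, ht, ih, cgbSpec, add_assoc, add_comm, List.append_assoc]
    · simp [h, ih, cgbSpec]

-- ===== VERDICT (by name: the statement is the Claim_ definition above) =====
theorem count_genes_between_spec : Claim_equal_count_genes_between := by
  intro r1 r2 gc _
  unfold Spec_count_genes_between count_genes_between count_genes_between_alt
  rw [cgb_fold_inv, cgbSolve_eq_spec r1 r2 gc.length gc (le_refl _)]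
  simp
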